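-- pv_equiv track=rewrite | github.com/tandeitnik/Evolving_Quantum_Circuits | qecc_functions.py | phase_distance
-- ===== SOURCE A (Python) =====
-- def phase_distance(N,codewords,stab_set):
--
--     #evaluating phase distance
--
--
--     common_stabilizers = stab_set[0]
--     dif_stabilizers = stab_set[0]
--
--     for i in range(1,len(stab_set)):
--
--         common_stabilizers = common_stabilizers.intersection(stab_set[i])
--         dif_stabilizers = dif_stabilizers.union(stab_set[i])
--
--     dif_stabilizers = list(dif_stabilizers - common_stabilizers)
--
--     error_weight = [0]*len(dif_stabilizers)
--
--     for i in range(len(dif_stabilizers)):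
--         for j in range(N):
--             if dif_stabilizers[i][j] != 'I':
--                 error_weight[i] += 1
--
--     phase_distance = min(error_weight)
--
--     return phase_distance
-- ===== SOURCE B (Python) =====
-- def phase_distance(N, codewords, stab_set):
--     # single counting pass: a stabilizer differs iff it appears in fewer than all sets
--     n = len(stab_set)
--     counts = {}
--     for st in stab_set:
--         for s in st:
--             counts[s] = counts.get(s, 0) + 1
--     differing = [s for s, c in counts.items() if c < n]
--     return min(sum(1 for j in range(N) if s[j] != 'I') for s in differing)
-- ===== Notes on version B (the rewrite author's own statement) =====
-- stated objective: alternative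
-- what changed: Replaces the fold of set intersection/union across stab_set by a single counting pass over all stabilizers into a dict; a stabilizer differs iff its count is below len(stab_set), then the minimum non-'I' weight over the first N positions is taken as before.
import Mathlib
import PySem

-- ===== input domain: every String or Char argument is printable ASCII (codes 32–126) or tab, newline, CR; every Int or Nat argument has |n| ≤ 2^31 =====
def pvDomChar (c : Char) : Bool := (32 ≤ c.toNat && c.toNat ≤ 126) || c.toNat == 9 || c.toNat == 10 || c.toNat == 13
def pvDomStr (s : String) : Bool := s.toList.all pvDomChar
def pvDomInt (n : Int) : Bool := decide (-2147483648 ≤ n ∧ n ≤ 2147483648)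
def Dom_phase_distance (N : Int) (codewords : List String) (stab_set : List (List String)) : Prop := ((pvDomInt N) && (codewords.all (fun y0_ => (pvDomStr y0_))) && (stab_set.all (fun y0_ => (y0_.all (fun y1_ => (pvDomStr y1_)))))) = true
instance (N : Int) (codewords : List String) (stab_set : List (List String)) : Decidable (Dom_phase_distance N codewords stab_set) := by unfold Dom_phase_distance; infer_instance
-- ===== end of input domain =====

-- B replaces A's fold of set intersections/unions by one counting pass over all stabilizers
-- (count < len(stab_set) ⇔ differing); same minimum weight, alternative algorithm.
-- Inner lists encode Python sets (distinct elements); equivalence is about the return value.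

-- ===== PORT A =====
-- A's inner weight loop: for j in range(N): if dif_stabilizers[i][j] != 'I': weight += 1
def pdWeightA (N : Int) (s : String) : Int :=
  (PySem.List.pyRange 0 N 1).foldl
    (fun w j => if ((PySem.Str.pyGet? s j).getD 'I') != 'I' then w + 1 else w) 0

def phase_distance (N : Int) (codewords : List String) (stab_set : List (List String)) : Int :=
  match stab_set with
  | [] => 0   -- Python raises IndexError on stab_set[0]; excluded by Pre_
  | s0 :: rest =>
    let common : PySem.Set String := rest.foldl (fun c t => PySem.Set.inter c t) s0
    let dif : PySem.Set String := rest.foldl (fun d t => PySem.Set.union d t) s0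
    let difList : List String := PySem.Set.diff dif common
    let error_weight : List Int := difList.map (fun s => pdWeightA N s)
    (PySem.List.min? error_weight (fun x => x)).getD 0   -- min([]) raises ValueError; excluded by Pre_

-- ===== PORT B =====
-- B's weight: sum(1 for j in range(N) if s[j] != 'I')
def pdWeightB (N : Int) (s : String) : Int :=
  ((PySem.List.pyRange 0 N 1).map
    (fun j => if ((PySem.Str.pyGet? s j).getD 'I') != 'I' then (1 : Int) else 0)).sum

def phase_distance_alt (N : Int) (codewords : List String) (stab_set : List (List String)) : Int :=
  let n : Int := PySem.List.len stab_set
  let counts : PySem.Dict String Int :=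
    stab_set.foldl (fun d st => st.foldl (fun d s => d.insert s (d.getD s 0 + 1)) d) PySem.Dict.empty
  let differing : List String := (counts.items.filter (fun p => p.2 < n)).map (fun p => p.1)
  (PySem.List.min? (differing.map (fun s => pdWeightB N s)) (fun x => x)).getD 0   -- min of empty generator raises ValueError; excluded by Pre_

-- ===== PRECONDITION & SPEC =====
-- Pre_ excludes: the empty stab_set (A raises IndexError, B ValueError); inputs where all stabilizer
-- sets are equal as sets (min over the empty difference raises ValueError in both); differing
-- stabilizers shorter than N (both raise IndexError at s[j]); and inner lists with duplicate
-- elements, which do not encode a Python set (the inner lists are Python sets in A's signature).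
def Pre_phase_distance (N : Int) (codewords : List String) (stab_set : List (List String)) : Prop :=
  stab_set ≠ [] ∧
  (∀ t ∈ stab_set, t.Nodup) ∧
  (∃ s ∈ stab_set.flatten, ∃ t ∈ stab_set, s ∉ t) ∧
  (∀ s ∈ stab_set.flatten, (∃ t ∈ stab_set, s ∉ t) → N ≤ PySem.Str.len s)
instance (N : Int) (codewords : List String) (stab_set : List (List String)) : Decidable (Pre_phase_distance N codewords stab_set) := by unfold Pre_phase_distance; infer_instance

def pvWitness_phase_distance : Int × List String × List (List String) :=
  (2, [], [["II", "XX"], ["II"]])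

def Spec_phase_distance (N : Int) (codewords : List String) (stab_set : List (List String)) (out : Int) : Prop := out = phase_distance_alt N codewords stab_set
instance (N : Int) (codewords : List String) (stab_set : List (List String)) (out : Int) : Decidable (Spec_phase_distance N codewords stab_set out) := by unfold Spec_phase_distance; infer_instance

-- ===== CLAIM (what is proved, stated in full; the proofs are below) =====
def Claim_equal_phase_distance : Prop := ∀ (N : Int) (codewords : List String) (stab_set : List (List String)), Dom_phase_distance N codewords stab_set → Pre_phase_distance N codewords stab_set → Spec_phase_distance N codewords stab_set (phase_distance N codewords stab_set)

-- ===== LEMMAS AND PROOFS =====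

-- the two weight computations agree (both count non-'I' positions among the first N)
theorem foldl_if_add_eq_sum_map (p : Int → Bool) (l : List Int) (a : Int) :
    l.foldl (fun w j => if p j then w + 1 else w) a
      = a + (l.map (fun j => if p j then (1 : Int) else 0)).sum := by
  induction l generalizing a with
  | nil => simp
  | cons j l ih =>
      by_cases hj : p j <;> simp [hj, ih] <;> ring

theorem pdWeight_eq (N : Int) (s : String) : pdWeightA N s = pdWeightB N s := by
  unfold pdWeightA pdWeightB
  rw [foldl_if_add_eq_sum_map]
  simp

-- A's intersection fold
theorem mem_inter_fold (rest : List (List String)) (s0 : List String) (x : String) :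
    x ∈ rest.foldl (fun c t => PySem.Set.inter c t) s0 ↔ x ∈ s0 ∧ ∀ t ∈ rest, x ∈ t := by
  induction rest generalizing s0 with
  | nil => simp
  | cons t rest ih =>
      simp only [List.foldl_cons, ih, PySem.Set.mem_inter, List.mem_cons]
      constructor
      · rintro ⟨⟨h0, ht⟩, h⟩
        refine ⟨h0, fun u hu => ?_⟩
        rcases hu with rfl | hu
        exacts [ht, h u hu]
      · rintro ⟨h0, h⟩
        exact ⟨⟨h0, h t (Or.inl rfl)⟩, fun u hu => h u (Or.inr hu)⟩

-- A's union fold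
theorem mem_union_fold (rest : List (List String)) (s0 : List String) (x : String) :
    x ∈ rest.foldl (fun d t => PySem.Set.union d t) s0 ↔ x ∈ s0 ∨ ∃ t ∈ rest, x ∈ t := by
  induction rest generalizing s0 with
  | nil => simp
  | cons t rest ih =>
      simp only [List.foldl_cons, ih, PySem.Set.mem_union, List.mem_cons]
      constructor
      · rintro ((h | h) | ⟨u, hu, hx⟩)
        · exact Or.inl h
        · exact Or.inr ⟨t, Or.inl rfl, h⟩
        · exact Or.inr ⟨u, Or.inr hu, hx⟩
      · rintro (h | ⟨u, (rfl | hu), hx⟩)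
        · exact Or.inl (Or.inl h)
        · exact Or.inl (Or.inr hx)
        · exact Or.inr ⟨u, hu, hx⟩

-- value of B's counting dict
theorem counts_getD (l : List (List String)) (d : PySem.Dict String Int) (x : String) :
    (l.foldl (fun d st => st.foldl (fun d s => d.insert s (d.getD s 0 + 1)) d) d).getD x 0
      = d.getD x 0 + ((l.map (fun st => (st.count x : Int))).sum) := by
  induction l generalizing d with
  | nil => simp
  | cons st l ih =>
      simp only [List.foldl_cons, ih, PySem.Dict.getD_foldl_insert_add_one, List.map_cons,
        List.sum_cons]
      ring

-- keys of B's counting dict stay Nodup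
theorem counts_keys_nodup (l : List (List String)) (d : PySem.Dict String Int)
    (h : d.keys.Nodup) :
    (l.foldl (fun d st => st.foldl (fun d s => d.insert s (d.getD s 0 + 1)) d) d).keys.Nodup := by
  induction l generalizing d with
  | nil => exact h
  | cons st l ih =>
      exact ih _ (PySem.Dict.nodup_keys_foldl_insert st _ d h)

-- membership in the keys of B's counting dict
theorem counts_mem_keys (l : List (List String)) (d : PySem.Dict String Int) (x : String) :
    x ∈ (l.foldl (fun d st => st.foldl (fun d s => d.insert s (d.getD s 0 + 1)) d) d).keys ↔
      x ∈ d.keys ∨ ∃ st ∈ l, x ∈ st := by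
  induction l generalizing d with
  | nil => simp
  | cons st l ih =>
      simp only [List.foldl_cons, ih, PySem.Dict.keys_foldl_insert, PySem.Set.mem_update,
        List.mem_cons]
      constructor
      · rintro ((h | h) | ⟨u, hu, hx⟩)
        · exact Or.inl h
        · exact Or.inr ⟨st, Or.inl rfl, h⟩
        · exact Or.inr ⟨u, Or.inr hu, hx⟩
      · rintro (h | ⟨u, (rfl | hu), hx⟩)
        · exact Or.inl (Or.inl h)
        · exact Or.inl (Or.inr hx)
        · exact Or.inr ⟨u, hu, hx⟩

-- with Nodup inner lists the count sum is the number of sets containing x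
theorem sum_count_eq_countP (l : List (List String)) (x : String)
    (h : ∀ t ∈ l, t.Nodup) :
    ((l.map (fun st => (st.count x : Int))).sum) = (l.countP (fun t => decide (x ∈ t)) : Int) := by
  induction l with
  | nil => simp
  | cons st l ih =>
      have hst : st.Nodup := h st (List.mem_cons_self ..)
      have hl := ih (fun t ht => h t (List.mem_cons_of_mem _ ht))
      by_cases hx : x ∈ st
      · have : st.count x = 1 := List.count_eq_one_of_mem hst hx
        simp [hx, this, hl]
        ring
      · have : st.count x = 0 := List.count_eq_zero.2 hx
        simp [hx, this, hl]

-- the value of Python's min depends only on the members of the list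
theorem min_getD_congr (l₁ l₂ : List Int) (h₁ : l₁ ≠ []) (h₂ : l₂ ≠ [])
    (h : ∀ x, x ∈ l₁ ↔ x ∈ l₂) :
    (PySem.List.min? l₁ (fun x => x)).getD 0 = (PySem.List.min? l₂ (fun x => x)).getD 0 := by
  obtain ⟨m₁, hm₁⟩ : ∃ m, PySem.List.min? l₁ (fun x => x) = some m := by
    cases hmin : PySem.List.min? l₁ (fun x => x) with
    | none => exact absurd ((PySem.List.min?_eq_none_iff _ _).1 hmin) h₁
    | some m => exact ⟨m, rfl⟩
  obtain ⟨m₂, hm₂⟩ : ∃ m, PySem.List.min? l₂ (fun x => x) = some m := by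
    cases hmin : PySem.List.min? l₂ (fun x => x) with
    | none => exact absurd ((PySem.List.min?_eq_none_iff _ _).1 hmin) h₂
    | some m => exact ⟨m, rfl⟩
  have le₁ : m₁ ≤ m₂ := PySem.List.min?_isMin hm₁ m₂ ((h m₂).2 (PySem.List.min?_mem hm₂))
  have le₂ : m₂ ≤ m₁ := PySem.List.min?_isMin hm₂ m₁ ((h m₁).1 (PySem.List.min?_mem hm₁))
  simp [hm₁, hm₂, le_antisymm le₁ le₂]

-- membership in B's differing list
theorem mem_differing (stab_set : List (List String)) (x : String)
    (hnd : ∀ t ∈ stab_set, t.Nodup) :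
    x ∈ ((stab_set.foldl (fun d st => st.foldl (fun d s => d.insert s (d.getD s 0 + 1)) d)
            (PySem.Dict.empty : PySem.Dict String Int)).items.filter
          (fun p => p.2 < PySem.List.len stab_set)).map (fun p => p.1) ↔
      (∃ st ∈ stab_set, x ∈ st) ∧ ¬ (∀ st ∈ stab_set, x ∈ st) := by
  set counts := stab_set.foldl (fun d st => st.foldl (fun d s => d.insert s (d.getD s 0 + 1)) d)
      (PySem.Dict.empty : PySem.Dict String Int) with hc
  have hnodup : counts.keys.Nodup := counts_keys_nodup _ _ PySem.Dict.nodup_keys_empty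
  have hkeys : x ∈ counts.keys ↔ ∃ st ∈ stab_set, x ∈ st := by
    rw [hc, counts_mem_keys]; simp
  have hval : counts.getD x 0 = (stab_set.countP (fun t => decide (x ∈ t)) : Int) := by
    rw [hc, counts_getD, sum_count_eq_countP _ _ hnd]; simp
  have hlt : counts.getD x 0 < PySem.List.len stab_set ↔ ¬ (∀ st ∈ stab_set, x ∈ st) := by
    rw [hval, PySem.List.len_eq]
    have hle : stab_set.countP (fun t => decide (x ∈ t)) ≤ stab_set.length :=
      List.countP_le_length
    constructor
    · intro h hall
      have : stab_set.countP (fun t => decide (x ∈ t)) = stab_set.length :=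
        List.countP_eq_length.2 (fun t ht => by simpa using hall t ht)
      omega
    · intro h
      rcases lt_or_eq_of_le hle with hlt | heq
      · exact_mod_cast hlt
      · exact absurd (fun t ht => by simpa using List.countP_eq_length.1 heq t ht) h
  constructor
  · intro hx
    obtain ⟨p, hp, rfl⟩ := List.mem_map.1 hx
    obtain ⟨hpi, hplt⟩ := List.mem_filter.1 hp
    have hgetD : counts.getD p.1 0 = p.2 :=
      PySem.Dict.getD_of_mem_items counts (by exact hpi) hnodup 0
    refine ⟨hkeys.1 (PySem.Dict.mem_keys_of_mem_items counts hpi), (hlt.1 ?_)⟩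
    rw [hgetD]; exact_mod_cast of_decide_eq_true hplt
  · rintro ⟨hmem, hnall⟩
    have hk : x ∈ counts.keys := hkeys.2 hmem
    obtain ⟨v, hv⟩ : ∃ v, counts.get? x = some v := by
      cases hg : counts.get? x with
      | none => exact absurd ((PySem.Dict.get?_eq_none_iff_not_mem_keys counts x).1 hg) (by simp [hk])
      | some v => exact ⟨v, rfl⟩
    have hitems : (x, v) ∈ counts.items := PySem.Dict.mem_items_of_get?_eq_some counts hv
    have hgetD : counts.getD x 0 = v := PySem.Dict.getD_of_mem_items counts hitems hnodup 0
    refine List.mem_map.2 ⟨(x, v), List.mem_filter.2 ⟨hitems, ?_⟩, rfl⟩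
    simpa [← hgetD] using hlt.2 hnall

-- membership in A's difference list
theorem mem_difList (s0 : List String) (rest : List (List String)) (x : String) :
    x ∈ PySem.Set.diff (rest.foldl (fun d t => PySem.Set.union d t) s0)
        (rest.foldl (fun c t => PySem.Set.inter c t) s0) ↔
      (∃ st ∈ s0 :: rest, x ∈ st) ∧ ¬ (∀ st ∈ s0 :: rest, x ∈ st) := by
  rw [PySem.Set.mem_diff, mem_union_fold, mem_inter_fold]
  simp only [List.mem_cons]
  constructor
  · rintro ⟨hu, hc⟩
    refine ⟨?_, ?_⟩
    · rcases hu with h | ⟨t, ht, hx⟩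
      · exact ⟨s0, Or.inl rfl, h⟩
      · exact ⟨t, Or.inr ht, hx⟩
    · intro hall
      exact hc ⟨hall s0 (Or.inl rfl), fun t ht => hall t (Or.inr ht)⟩
  · rintro ⟨⟨t, ht, hx⟩, hnall⟩
    refine ⟨?_, ?_⟩
    · rcases ht with rfl | ht
      · exact Or.inl hx
      · exact Or.inr ⟨t, ht, hx⟩
    · rintro ⟨h0, hrest⟩
      refine hnall fun u hu => ?_
      rcases hu with rfl | hu
      exacts [h0, hrest u hu]

-- ===== VERDICT (by name: the statement is the Claim_ definition above) =====
theorem phase_distance_spec : Claim_equal_phase_distance := by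
  intro N codewords stab_set _ hpre
  obtain ⟨hne, hnd, ⟨w, hwmem, hwdiff⟩, _⟩ := hpre
  unfold Spec_phase_distance phase_distance phase_distance_alt
  match stab_set, hne with
  | s0 :: rest, _ =>
    simp only []
    have hiff : ∀ x, x ∈ PySem.Set.diff (rest.foldl (fun d t => PySem.Set.union d t) s0)
        (rest.foldl (fun c t => PySem.Set.inter c t) s0) ↔
        x ∈ (((s0 :: rest).foldl (fun d st => st.foldl (fun d s => d.insert s (d.getD s 0 + 1)) d)
            (PySem.Dict.empty : PySem.Dict String Int)).items.filter
          (fun p => p.2 < PySem.List.len (s0 :: rest))).map (fun p => p.1) := by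
      intro x
      rw [mem_difList, mem_differing _ _ hnd]
    have hwP : (∃ st ∈ s0 :: rest, w ∈ st) ∧ ¬ (∀ st ∈ s0 :: rest, w ∈ st) := by
      refine ⟨List.mem_flatten.1 hwmem, ?_⟩
      obtain ⟨t, ht, hnt⟩ := hwdiff
      exact fun hall => hnt (hall t ht)
    apply min_getD_congr
    · intro hemp
      have := ((mem_difList s0 rest w).2 hwP)
      rw [List.eq_nil_iff_forall_not_mem] at hemp
      exact hemp _ (List.mem_map.2 ⟨w, this, rfl⟩)
    · intro hemp
      have := (hiff w).1 ((mem_difList s0 rest w).2 hwP)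
      rw [List.eq_nil_iff_forall_not_mem] at hemp
      exact hemp _ (List.mem_map.2 ⟨w, this, rfl⟩)
    · intro v
      constructor
      · intro hv
        obtain ⟨s, hs, rfl⟩ := List.mem_map.1 hv
        exact List.mem_map.2 ⟨s, (hiff s).1 hs, (pdWeight_eq N s).symm⟩
      · intro hv
        obtain ⟨s, hs, rfl⟩ := List.mem_map.1 hv
        exact List.mem_map.2 ⟨s, (hiff s).2 hs, pdWeight_eq N s⟩
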